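-- pv_equiv track=rewrite | github.com/tugloo1/leetcode | problem_205.py | convert_string_to_isomorphic
-- ===== SOURCE A (Python) =====
-- def convert_string_to_isomorphic(input_string: str) -> str:
--     old_to_new_map = {}
--     next_letter_ascii = ord('a')
--     new_string = ''
--
--     for char in input_string:
--         if char in old_to_new_map:
--             new_string += old_to_new_map[char]
--         else:
--             new_char = chr(next_letter_ascii)
--             new_string += new_char
--             old_to_new_map[char] = new_char
--             next_letter_ascii += 1
--     return new_string
-- ===== SOURCE B (Python) =====
-- def convert_string_to_isomorphic(input_string: str) -> str:
--     # Build the canonical translation table over the distinct characters only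
--     # (first-appearance order), then translate the whole string in one pass.
--     table = {ord(c): ord('a') + i for i, c in enumerate(dict.fromkeys(input_string))}
--     return input_string.translate(table)
-- ===== Notes on version B (the rewrite author's own statement) =====
-- stated objective: faster
-- what changed: Replaces A's single interleaved build-and-emit loop (growing a dict and the output string together) with a build-then-translate decomposition: a translation table is built once over the distinct characters via dict.fromkeys/enumerate, then the result is produced in a separate C-level str.translate pass.
import Mathlib
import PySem

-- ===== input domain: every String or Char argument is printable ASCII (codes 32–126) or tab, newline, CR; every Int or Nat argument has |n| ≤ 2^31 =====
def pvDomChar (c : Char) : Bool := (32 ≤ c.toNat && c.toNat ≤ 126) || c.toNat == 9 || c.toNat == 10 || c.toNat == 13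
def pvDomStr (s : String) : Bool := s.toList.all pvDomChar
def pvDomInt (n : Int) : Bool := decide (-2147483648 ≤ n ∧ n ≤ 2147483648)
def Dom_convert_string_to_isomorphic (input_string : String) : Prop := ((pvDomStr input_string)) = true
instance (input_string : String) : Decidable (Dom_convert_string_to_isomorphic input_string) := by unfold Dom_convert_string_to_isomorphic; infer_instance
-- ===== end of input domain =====

-- B replaces A's interleaved build-and-emit loop with a build-table-then-translate
-- decomposition (measured faster in a timing run; equal return value proved below).

-- ===== PORT A =====
-- one loop iteration: look the char up; emit the mapped char, or mint the next letter
def pvStepA (acc : PySem.Dict Char Char × Nat × List Char) (c : Char) :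
    PySem.Dict Char Char × Nat × List Char :=
  match acc with
  | (d, next, out) =>
    match d.get? c with
    | some v => (d, next, out ++ [v])
    | none => (d.insert c (Char.ofNat next), next + 1, out ++ [Char.ofNat next])

def convert_string_to_isomorphic (input_string : String) : String :=
  String.mk (input_string.toList.foldl pvStepA (PySem.Dict.empty, 97, [])).2.2

-- ===== PORT B =====
-- table lookup 'ord('a') + i' for the i-th distinct char; every char of the input is
-- in the table, so the `.getD 0` default is never used (mirrors translate's totality)
def pvCode (distinct : List Char) (c : Char) : Char :=
  Char.ofNat (97 + ((PySem.List.index? distinct c).getD 0))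

def convert_string_to_isomorphic_alt (input_string : String) : String :=
  let distinct := PySem.List.dedup input_string.toList   -- dict.fromkeys(input_string)
  String.mk (input_string.toList.map (pvCode distinct))

-- ===== PRECONDITION & SPEC =====
def Spec_convert_string_to_isomorphic (input_string : String) (out : String) : Prop := out = convert_string_to_isomorphic_alt input_string
instance (input_string : String) (out : String) : Decidable (Spec_convert_string_to_isomorphic input_string out) := by unfold Spec_convert_string_to_isomorphic; infer_instance

-- ===== CLAIM (what is proved, stated in full; the proofs are below) =====
def Claim_equal_convert_string_to_isomorphic : Prop := ∀ (input_string : String), Dom_convert_string_to_isomorphic input_string → Spec_convert_string_to_isomorphic input_string (convert_string_to_isomorphic input_string)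

-- ===== LEMMAS AND PROOFS =====

-- the dictionary A has built after consuming a prefix p
def pvMk (p : List Char) : PySem.Dict Char Char :=
  PySem.Dict.mk ((PySem.List.dedup p).map (fun x => (x, pvCode (PySem.List.dedup p) x)))

lemma dedup_append_singleton (p : List Char) (c : Char) :
    PySem.List.dedup (p ++ [c]) =
      if c ∈ PySem.List.dedup p then PySem.List.dedup p else PySem.List.dedup p ++ [c] := by
  simp [PySem.List.dedup_eq_ofList, PySem.Set.ofList_eq_foldl, List.foldl_append,
    PySem.Set.add, PySem.Set.contains]

lemma dedup_prefix (rest p : List Char) :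
    ∃ t, PySem.List.dedup (p ++ rest) = PySem.List.dedup p ++ t := by
  induction rest generalizing p with
  | nil => exact ⟨[], by simp⟩
  | cons c r ih =>
    obtain ⟨t, ht⟩ := ih (p ++ [c])
    rw [List.append_assoc, List.singleton_append] at ht
    rw [ht, dedup_append_singleton]
    split
    · exact ⟨t, rfl⟩
    · exact ⟨c :: t, by simp⟩

lemma get?_pvMk (l : List Char) (f : Char → Char) (c : Char) :
    (PySem.Dict.mk (l.map (fun x => (x, f x)))).get? c =
      if c ∈ l then some (f c) else none := by
  induction l with
  | nil => simp [PySem.Dict.get?]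
  | cons x xs ih =>
    rw [List.map_cons, PySem.Dict.get?_mk_cons, ih]
    by_cases h : x = c
    · subst h; simp
    · simp [h, Ne.symm h]

lemma pvCode_append (l t : List Char) (c : Char) (h : c ∈ l) :
    pvCode (l ++ t) c = pvCode l c := by
  unfold pvCode
  rw [PySem.List.index?_append_of_mem t h]

lemma loopA (rest p out : List Char) :
    (rest.foldl pvStepA (pvMk p, 97 + (PySem.List.dedup p).length, out)).2.2
      = out ++ rest.map (pvCode (PySem.List.dedup (p ++ rest))) := by
  induction rest generalizing p out with
  | nil => simp
  | cons c r ih =>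
    have hmem := PySem.List.mem_dedup p c
    rw [List.foldl_cons]
    by_cases hc : c ∈ p
    · -- seen before: dict, counter unchanged; emit the stored letter
      have hd : PySem.List.dedup (p ++ [c]) = PySem.List.dedup p := by
        rw [dedup_append_singleton, if_pos (hmem.2 hc)]
      have hget : (pvMk p).get? c = some (pvCode (PySem.List.dedup p) c) := by
        rw [pvMk, get?_pvMk, if_pos (hmem.2 hc)]
      have hstep : pvStepA (pvMk p, 97 + (PySem.List.dedup p).length, out) c
          = (pvMk p, 97 + (PySem.List.dedup p).length, out ++ [pvCode (PySem.List.dedup p) c]) := by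
        simp only [pvStepA, hget]
      rw [hstep]
      have hmk : pvMk (p ++ [c]) = pvMk p := by
        simp only [pvMk, hd]
      have := ih (p ++ [c]) (out ++ [pvCode (PySem.List.dedup p) c])
      rw [hmk, hd] at this
      simp only [List.append_assoc, List.singleton_append] at this
      obtain ⟨t, ht⟩ := dedup_prefix (c :: r) p
      have hhead : pvCode (PySem.List.dedup (p ++ c :: r)) c = pvCode (PySem.List.dedup p) c := by
        rw [ht]; exact pvCode_append _ _ _ (hmem.2 hc)
      rw [List.map_cons, hhead, this]
    · -- fresh char: append it to the dict, bump the counter, emit the new letter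
      have hnc : c ∉ PySem.List.dedup p := fun h => hc (hmem.1 h)
      have hd : PySem.List.dedup (p ++ [c]) = PySem.List.dedup p ++ [c] := by
        rw [dedup_append_singleton, if_neg hnc]
      have hget : (pvMk p).get? c = none := by
        rw [pvMk, get?_pvMk, if_neg (fun h => hc (hmem.1 h))]
      have hcontains : (pvMk p).contains c = false := by
        rw [PySem.Dict.contains_eq_isSome_get?, hget]; rfl
      have hdict : (pvMk p).insert c (Char.ofNat (97 + (PySem.List.dedup p).length))
          = pvMk (p ++ [c]) := by
        apply PySem.Dict.ext
        rw [PySem.Dict.items_insert_of_not_contains _ _ hcontains]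
        show _ = ((PySem.List.dedup (p ++ [c])).map (fun x => (x, pvCode (PySem.List.dedup (p ++ [c])) x)))
        rw [hd, List.map_append, List.map_cons, List.map_nil]
        congr 1
        · exact (List.map_congr_left (fun x hx => by
            rw [pvCode_append _ _ _ hx])).symm
        · unfold pvCode
          rw [PySem.List.index?_append_singleton_self _ _ hnc]
          simp
      have hstep : pvStepA (pvMk p, 97 + (PySem.List.dedup p).length, out) c
          = (pvMk (p ++ [c]), 97 + (PySem.List.dedup (p ++ [c])).length,
             out ++ [Char.ofNat (97 + (PySem.List.dedup p).length)]) := by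
        simp only [pvStepA, hget]
        rw [hdict, hd]
        simp [Nat.add_assoc]
      rw [hstep]
      have := ih (p ++ [c]) (out ++ [Char.ofNat (97 + (PySem.List.dedup p).length)])
      simp only [List.append_assoc, List.singleton_append] at this
      obtain ⟨t, ht⟩ := dedup_prefix (c :: r) p
      obtain ⟨t2, ht2⟩ := dedup_prefix r (p ++ [c])
      simp only [List.append_assoc, List.singleton_append] at ht2
      rw [ht, hd] at ht2
      have hidx : PySem.List.index? (PySem.List.dedup (p ++ c :: r)) c
          = some (PySem.List.dedup p).length := by
        rw [ht, ht2, PySem.List.index?_append_of_mem t2 (v := c) (by simp),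
          PySem.List.index?_append_singleton_self _ _ hnc]
      have hhead : pvCode (PySem.List.dedup (p ++ c :: r)) c
          = Char.ofNat (97 + (PySem.List.dedup p).length) := by
        unfold pvCode
        rw [hidx]
        rfl
      rw [List.map_cons, hhead, this]

-- ===== VERDICT (by name: the statement is the Claim_ definition above) =====
theorem convert_string_to_isomorphic_spec : Claim_equal_convert_string_to_isomorphic := by
  intro s _
  unfold Spec_convert_string_to_isomorphic convert_string_to_isomorphic convert_string_to_isomorphic_alt
  have h0 : (PySem.Dict.empty : PySem.Dict Char Char) = pvMk [] := rfl
  have h1 : (97 : Nat) = 97 + (PySem.List.dedup ([] : List Char)).length := rfl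
  rw [h0, h1, loopA s.toList [] []]
  simp
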